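-- pv_equiv track=rewrite | github.com/IgorLavrentev/survivor | salary_table.py | SynchronizingTables
-- ===== SOURCE A (Python) =====
-- def SynchronizingTables(N, ids, salary):
--     dictionary = {}
--     salary.sort() # sorting the salary array
--
--     # matching account numbers and salaries using a dictionary
--     i = 0
--     for j in range(min(ids), max(ids) + 1):
--         if j in ids:
--             dictionary[j] = salary[i]
--             i += 1
--
--     salary.clear() # deleting the contents of the salary array
--
--     # filling in the salary list according to the accounting numbers
--     for k in ids:
--         salary.append(dictionary[k])
--
--     return salary
-- ===== SOURCE B (Python) =====
-- def SynchronizingTables(N, ids, salary):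
--     # B mutates salary in place (like A) and returns the same list object.
--     order = {v: i for i, v in enumerate(sorted(set(ids)))}
--     ranked = sorted(salary)
--     salary[:] = [ranked[order[k]] for k in ids]
--     return salary
-- ===== Notes on version B (the rewrite author's own statement) =====
-- stated objective: faster
-- what changed: Replaces A's scan of every integer from min(ids) to max(ids) (each with an O(N) membership test) by sorting the distinct ids once and ranking them with an enumerate dict, then mapping ids through it.
import Mathlib
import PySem

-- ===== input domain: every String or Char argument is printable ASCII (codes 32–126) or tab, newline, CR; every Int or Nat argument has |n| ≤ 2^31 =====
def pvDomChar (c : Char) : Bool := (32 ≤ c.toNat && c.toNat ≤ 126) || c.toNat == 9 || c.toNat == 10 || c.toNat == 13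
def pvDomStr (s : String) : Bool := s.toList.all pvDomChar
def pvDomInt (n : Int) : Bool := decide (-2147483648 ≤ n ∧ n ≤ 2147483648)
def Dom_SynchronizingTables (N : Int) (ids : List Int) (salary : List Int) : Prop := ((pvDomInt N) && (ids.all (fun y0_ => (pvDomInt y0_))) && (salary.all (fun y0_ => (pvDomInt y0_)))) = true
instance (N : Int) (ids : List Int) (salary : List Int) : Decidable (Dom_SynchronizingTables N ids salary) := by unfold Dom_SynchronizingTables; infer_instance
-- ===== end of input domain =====

-- B replaces A's scan over the whole integer range min(ids)..max(ids) by sorting the distinct ids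
-- and ranking them in one dict comprehension: O((max-min)·N) becomes O(N log N).
-- Both A and B mutate `salary` in place and return that same list with identical final contents;
-- the theorems below are about the return value.

-- ===== PORT A =====
def SynchronizingTables (N : Int) (ids : List Int) (salary : List Int) : List Int :=
  -- salary.sort()
  let s := PySem.List.sorted salary (fun x => x) false
  -- min(ids) / max(ids): Python raises on empty ids, excluded by Pre_
  let lo := (PySem.List.min? ids (fun x => x)).getD 0
  let hi := (PySem.List.max? ids (fun x => x)).getD 0
  -- for j in range(lo, hi+1): if j in ids: dictionary[j] = salary[i]; i += 1
  -- salary[i] via pyGetD (in range under Pre_); dictionary[k] via getD (always present here)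
  let st := (PySem.List.pyRange lo (hi + 1) 1).foldl
      (fun (st : PySem.Dict Int Int × Int) j =>
        if j ∈ ids then (st.1.insert j (PySem.List.pyGetD s st.2 0), st.2 + 1) else st)
      (PySem.Dict.empty, 0)
  ids.map (fun k => st.1.getD k 0)

-- ===== PORT B =====
def SynchronizingTables_alt (N : Int) (ids : List Int) (salary : List Int) : List Int :=
  -- order = {v: i for i, v in enumerate(sorted(set(ids)))}
  let distinct := PySem.List.sorted (PySem.Set.ofList ids) (fun x => x) false
  let order := (PySem.List.enumerate distinct 0).foldl
      (fun (d : PySem.Dict Int Int) p => d.insert p.2 p.1) PySem.Dict.empty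
  -- ranked = sorted(salary); [ranked[order[k]] for k in ids]
  let ranked := PySem.List.sorted salary (fun x => x) false
  ids.map (fun k => PySem.List.pyGetD ranked (order.getD k 0) 0)

-- ===== PRECONDITION & SPEC =====
-- Pre_ excludes exactly the inputs where Python A raises: empty ids (ValueError from min())
-- and more distinct ids than salaries (IndexError on salary[i]).
def Pre_SynchronizingTables (N : Int) (ids : List Int) (salary : List Int) : Prop :=
  ids ≠ [] ∧ (PySem.Set.ofList ids).length ≤ salary.length
instance (N : Int) (ids : List Int) (salary : List Int) : Decidable (Pre_SynchronizingTables N ids salary) := by unfold Pre_SynchronizingTables; infer_instance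

def pvWitness_SynchronizingTables : Int × List Int × List Int := (3, [4, 2, 4, 9], [30, 10, 20])

def Spec_SynchronizingTables (N : Int) (ids : List Int) (salary : List Int) (out : List Int) : Prop := out = SynchronizingTables_alt N ids salary
instance (N : Int) (ids : List Int) (salary : List Int) (out : List Int) : Decidable (Spec_SynchronizingTables N ids salary out) := by unfold Spec_SynchronizingTables; infer_instance

-- ===== CLAIM (what is proved, stated in full; the proofs are below) =====
def Claim_equal_SynchronizingTables : Prop := ∀ (N : Int) (ids : List Int) (salary : List Int), Dom_SynchronizingTables N ids salary → Pre_SynchronizingTables N ids salary → Spec_SynchronizingTables N ids salary (SynchronizingTables N ids salary)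

-- ===== LEMMAS AND PROOFS =====

-- A's dict loop over a list of distinct keys: a key not in the list keeps its value
lemma foldA_getD_not_mem (T s : List Int) (d : PySem.Dict Int Int) (i k : Int) (hk : k ∉ T) :
    ((T.foldl (fun (st : PySem.Dict Int Int × Int) j =>
        (st.1.insert j (PySem.List.pyGetD s st.2 0), st.2 + 1)) (d, i)).1).getD k 0 = d.getD k 0 := by
  induction T generalizing d i with
  | nil => rfl
  | cons x T ih =>
    simp only [List.mem_cons, not_or] at hk
    simp only [List.foldl_cons]
    rw [ih _ _ hk.2, PySem.Dict.getD_insert_of_ne _ _ _ hk.1]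

-- A's dict loop: a key in the (nodup) list ends with the salary at (start counter + its index)
lemma foldA_getD_mem (T s : List Int) (d : PySem.Dict Int Int) (i k : Int)
    (hnd : T.Nodup) (hk : k ∈ T) :
    ((T.foldl (fun (st : PySem.Dict Int Int × Int) j =>
        (st.1.insert j (PySem.List.pyGetD s st.2 0), st.2 + 1)) (d, i)).1).getD k 0
      = PySem.List.pyGetD s (i + (T.idxOf k : Int)) 0 := by
  induction T generalizing d i with
  | nil => cases hk
  | cons x T ih =>
    simp only [List.foldl_cons]
    rcases List.mem_cons.mp hk with h | h
    · subst h
      rw [foldA_getD_not_mem _ _ _ _ _ ((List.nodup_cons.mp hnd).1),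
        PySem.Dict.getD_insert_self, List.idxOf_cons_self]
      simp
    · have hne : k ≠ x := fun he => ((List.nodup_cons.mp hnd).1) (he ▸ h)
      rw [ih _ _ ((List.nodup_cons.mp hnd).2) h, List.idxOf_cons_ne _ (Ne.symm hne)]
      push_cast; ring_nf

-- B's order dict: same two facts for the enumerate loop
lemma orderB_getD_not_mem (T : List Int) (d : PySem.Dict Int Int) (i k : Int) (hk : k ∉ T) :
    ((PySem.List.enumerate T i).foldl
        (fun (d : PySem.Dict Int Int) p => d.insert p.2 p.1) d).getD k 0 = d.getD k 0 := by
  induction T generalizing d i with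
  | nil => rfl
  | cons x T ih =>
    simp only [List.mem_cons, not_or] at hk
    rw [PySem.List.enumerate_cons]
    simp only [List.foldl_cons]
    rw [ih _ _ hk.2, PySem.Dict.getD_insert_of_ne _ _ _ hk.1]

lemma orderB_getD_mem (T : List Int) (d : PySem.Dict Int Int) (i k : Int)
    (hnd : T.Nodup) (hk : k ∈ T) :
    ((PySem.List.enumerate T i).foldl
        (fun (d : PySem.Dict Int Int) p => d.insert p.2 p.1) d).getD k 0
      = i + (T.idxOf k : Int) := by
  induction T generalizing d i with
  | nil => cases hk
  | cons x T ih =>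
    rw [PySem.List.enumerate_cons]
    simp only [List.foldl_cons]
    rcases List.mem_cons.mp hk with h | h
    · subst h
      rw [orderB_getD_not_mem _ _ _ _ ((List.nodup_cons.mp hnd).1),
        PySem.Dict.getD_insert_self, List.idxOf_cons_self]
      simp
    · have hne : k ≠ x := fun he => ((List.nodup_cons.mp hnd).1) (he ▸ h)
      rw [ih _ _ ((List.nodup_cons.mp hnd).2) h, List.idxOf_cons_ne _ (Ne.symm hne)]
      push_cast; ring_nf

-- A's filtered range min(ids)..max(ids) is exactly sorted(set(ids))
lemma range_filter_eq_sorted_set (ids : List Int) (lo hi : Int)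
    (hlo : PySem.List.min? ids (fun x => x) = some lo)
    (hhi : PySem.List.max? ids (fun x => x) = some hi) :
    PySem.List.sorted (PySem.Set.ofList ids) (fun x => x) false
      = (PySem.List.pyRange lo (hi + 1) 1).filter (fun j => decide (j ∈ ids)) := by
  apply PySem.List.sorted_eq_of_perm_of_pairwise_lt
  · rw [List.perm_ext_iff_of_nodup
      (List.Nodup.filter _ (PySem.List.nodup_pyRange_one lo (hi+1)))
      (PySem.Set.nodup_ofList ids)]
    intro a
    simp only [List.mem_filter, PySem.List.mem_pyRange_one, decide_eq_true_eq,
      PySem.Set.mem_ofList]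
    constructor
    · exact fun h => h.2
    · intro ha
      exact ⟨⟨PySem.List.min?_isMin hlo a ha, by have := PySem.List.max?_isMax hhi a ha; omega⟩, ha⟩
  · exact List.Pairwise.filter _ (PySem.List.pairwise_lt_pyRange_one lo (hi+1))

-- ===== VERDICT (by name: the statement is the Claim_ definition above) =====
theorem SynchronizingTables_spec : Claim_equal_SynchronizingTables := by
  intro N ids salary _ hpre
  obtain ⟨hne, _⟩ := hpre
  unfold Spec_SynchronizingTables SynchronizingTables SynchronizingTables_alt
  simp only []
  -- name the pieces
  obtain ⟨lo, hlo⟩ : ∃ lo, PySem.List.min? ids (fun x => x) = some lo := by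
    cases h : PySem.List.min? ids (fun x => x) with
    | none => exact absurd ((PySem.List.min?_eq_none_iff ids (fun x => x)).mp h) hne
    | some m => exact ⟨m, rfl⟩
  obtain ⟨hi, hhi⟩ : ∃ hi, PySem.List.max? ids (fun x => x) = some hi := by
    cases h : PySem.List.max? ids (fun x => x) with
    | none => exact absurd ((PySem.List.max?_eq_none_iff ids (fun x => x)).mp h) hne
    | some m => exact ⟨m, rfl⟩
  rw [hlo, hhi]
  simp only [Option.getD_some]
  apply List.map_congr_left
  intro k hk
  set s := PySem.List.sorted salary (fun x => x) false with hs
  set S := PySem.List.sorted (PySem.Set.ofList ids) (fun x => x) false with hS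
  have hSf := range_filter_eq_sorted_set ids lo hi hlo hhi
  have hfold : (PySem.List.pyRange lo (hi + 1) 1).foldl
      (fun (st : PySem.Dict Int Int × Int) j =>
        if j ∈ ids then (st.1.insert j (PySem.List.pyGetD s st.2 0), st.2 + 1) else st)
      (PySem.Dict.empty, 0)
      = S.foldl (fun (st : PySem.Dict Int Int × Int) j =>
        (st.1.insert j (PySem.List.pyGetD s st.2 0), st.2 + 1)) (PySem.Dict.empty, 0) := by
    rw [hS, hSf, List.foldl_filter]
    apply List.foldl_ext
    intro st j _
    simp only [decide_eq_true_eq]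
  have hSnd : S.Nodup :=
    List.Pairwise.imp ne_of_lt (PySem.List.sorted_ofList_pairwise_lt ids)
  have hkS : k ∈ S := by
    rw [hS, PySem.List.mem_sorted, PySem.Set.mem_ofList]; exact hk
  rw [hfold, foldA_getD_mem S s PySem.Dict.empty 0 k hSnd hkS,
    orderB_getD_mem S PySem.Dict.empty 0 k hSnd hkS]
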